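-- pv_equiv track=rewrite | github.com/Yash7256/CyberSec-CLI | core/validators.py | validate_port_range
-- ===== SOURCE A (Python) =====
-- from typing import List, Optional, Union
--
-- def validate_port_range(ports: List[int]) -> bool:
--     """
--     Validate a list of ports to ensure they're in a safe range.
--
--     Args:
--         ports: List of port numbers to validate
--
--     Returns:
--         True if all ports are valid, False otherwise
--     """
--     if not isinstance(ports, list):
--         return False
--
--     if len(ports) > 1000:  # Reasonable limit
--         return False
--
--     seen = set()
--     for port in ports:
--         if not isinstance(port, int):
--             return False
--         if port < 1 or port > 65535:
--             return False
--         if port in seen:  # No duplicates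
--             return False
--         seen.add(port)
--
--     return True
-- ===== SOURCE B (Python) =====
-- def validate_port_range(ports):
--     """Validate ports: ints in 1..65535, no duplicates, at most 1000 entries."""
--     if not isinstance(ports, list):
--         return False
--     for p in ports:
--         if not isinstance(p, int) or p < 1 or p > 65535:
--             return False
--     if len(ports) > 1000:
--         return False
--     s = sorted(ports)
--     return all(a < b for a, b in zip(s, s[1:]))
-- ===== Notes on version B (the rewrite author's own statement) =====
-- stated objective: alternative
-- what changed: Duplicate detection by sorting and checking that adjacent elements of the sorted list are strictly increasing, instead of A's incremental membership test against a growing seen-set.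
import Mathlib
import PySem

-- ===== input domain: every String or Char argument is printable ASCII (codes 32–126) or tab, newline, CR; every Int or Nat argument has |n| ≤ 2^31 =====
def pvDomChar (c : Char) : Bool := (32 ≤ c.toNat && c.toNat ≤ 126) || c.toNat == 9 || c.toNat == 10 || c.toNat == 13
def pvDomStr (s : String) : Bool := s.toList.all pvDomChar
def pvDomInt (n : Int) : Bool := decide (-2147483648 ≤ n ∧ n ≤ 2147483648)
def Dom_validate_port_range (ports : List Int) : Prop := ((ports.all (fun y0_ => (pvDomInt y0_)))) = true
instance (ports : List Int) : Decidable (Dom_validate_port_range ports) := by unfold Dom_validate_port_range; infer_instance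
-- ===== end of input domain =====

-- B detects duplicates by sorting the list and checking adjacent elements are strictly
-- increasing, instead of A's incremental membership test against a growing seen-set: alternative.

-- ===== PORT A =====
-- the 'for port in ports' loop with the growing 'seen' set and early returns
def vprLoop (seen : PySem.Set Int) : List Int → Bool
  | [] => true
  | p :: rest =>
    if p < 1 || p > 65535 then false
    else if PySem.Set.contains seen p then false
    else vprLoop (PySem.Set.add seen p) rest

def validate_port_range (ports : List Int) : Bool :=
  -- 'isinstance(ports, list)' is always true under the typed signature
  if ports.length > 1000 then false
  else vprLoop PySem.Set.empty ports

-- ===== PORT B =====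
-- the range-check loop of Source B
def vprRange : List Int → Bool
  | [] => true
  | p :: rest => if p < 1 || p > 65535 then false else vprRange rest

def validate_port_range_alt (ports : List Int) : Bool :=
  if !vprRange ports then false
  else if ports.length > 1000 then false
  else
    let s := PySem.List.sorted ports (fun x => x) false
    (s.zip s.tail).all (fun ab => decide (ab.1 < ab.2))

-- ===== PRECONDITION & SPEC =====
def Spec_validate_port_range (ports : List Int) (out : Bool) : Prop := out = validate_port_range_alt ports
instance (ports : List Int) (out : Bool) : Decidable (Spec_validate_port_range ports out) := by unfold Spec_validate_port_range; infer_instance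

-- ===== CLAIM (what is proved, stated in full; the proofs are below) =====
def Claim_equal_validate_port_range : Prop := ∀ (ports : List Int), Dom_validate_port_range ports → Spec_validate_port_range ports (validate_port_range ports)

-- ===== LEMMAS AND PROOFS =====

-- A's loop = range check && (no dups among the list nor against 'seen')
theorem vprLoop_eq (l : List Int) : ∀ (seen : PySem.Set Int),
    vprLoop seen l = (vprRange l && decide (l.Nodup ∧ ∀ x ∈ l, x ∉ seen)) := by
  induction l with
  | nil => intro seen; simp [vprLoop, vprRange]
  | cons p rest ih =>
    intro seen
    simp only [vprLoop, vprRange]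
    by_cases hr : (p < 1 || p > 65535) = true
    · rw [if_pos hr, if_pos hr]; simp
    · rw [if_neg hr, if_neg hr]
      by_cases hs : p ∈ seen
      · rw [if_pos (by simpa [PySem.Set.contains_iff] using hs)]
        have hd : decide ((p :: rest).Nodup ∧ ∀ x ∈ p :: rest, x ∉ seen) = false := by
          simp only [decide_eq_false_iff_not]
          rintro ⟨-, hmem⟩
          exact hmem p List.mem_cons_self hs
        rw [hd, Bool.and_false]
      · rw [if_neg (by simpa [PySem.Set.contains_iff] using hs), ih]
        congr 1
        rw [decide_eq_decide]
        simp only [List.nodup_cons, List.mem_cons, forall_eq_or_imp, PySem.Set.mem_add, not_or]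
        constructor
        · rintro ⟨hn, hmem⟩
          exact ⟨⟨fun hp => (hmem p hp).2 rfl, hn⟩, hs, fun x hx => (hmem x hx).1⟩
        · rintro ⟨⟨hpn, hn⟩, _, hmem⟩
          exact ⟨hn, fun x hx => ⟨hmem x hx, fun h => hpn (h ▸ hx)⟩⟩

-- the adjacent-pairs test checks the chain of (<)
theorem zip_tail_all_lt (s : List Int) :
    ((s.zip s.tail).all (fun ab => decide (ab.1 < ab.2)) = true) ↔ s.IsChain (· < ·) := by
  induction s with
  | nil => simp
  | cons a t ih =>
    cases t with
    | nil => simp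
    | cons b u =>
      simp only [List.tail_cons, List.zip_cons_cons, List.all_cons, List.isChain_cons_cons,
        Bool.and_eq_true, decide_eq_true_eq]
      rw [← ih]; simp

-- on the sorted list, adjacent-strict ↔ the original list has no duplicates
theorem chain_sorted_iff_nodup (l : List Int) :
    (PySem.List.sorted l (fun x => x) false).IsChain (· < ·) ↔ l.Nodup := by
  have hperm := PySem.List.sorted_perm l (fun x => x) false
  have hle : (PySem.List.sorted l (fun x => x) false).Pairwise (· ≤ ·) := by
    simpa using PySem.List.sorted_pairwise l (fun x => x)
  rw [List.isChain_iff_pairwise, ← hperm.nodup_iff]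
  constructor
  · intro h
    exact h.imp (fun {a b} hab => ne_of_lt hab)
  · intro h
    exact (hle.and h).imp (fun {a b} hab => lt_of_le_of_ne hab.1 hab.2)

-- ===== VERDICT (by name: the statement is the Claim_ definition above) =====
theorem validate_port_range_spec : Claim_equal_validate_port_range := by
  intro ports _
  unfold Spec_validate_port_range validate_port_range validate_port_range_alt
  by_cases hlen : ports.length > 1000
  · rw [if_pos hlen]
    split <;> simp [hlen]
  · rw [if_neg hlen, vprLoop_eq]
    by_cases hr : vprRange ports = true
    · rw [if_neg (by simp [hr]), if_neg hlen, hr, Bool.true_and]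
      have := zip_tail_all_lt (PySem.List.sorted ports (fun x => x) false)
      rw [chain_sorted_iff_nodup] at this
      by_cases hn : ports.Nodup
      · simp only [this.mpr hn]
        simp [hn, PySem.Set.empty]
      · rw [decide_eq_false (by simp [hn])]
        exact (Bool.eq_false_iff.mpr (fun h => hn (this.mp h))).symm
    · simp only [Bool.not_eq_true] at hr
      rw [if_pos (by simp [hr]), hr, Bool.false_and]
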